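-- pv_equiv track=rewrite | github.com/seungye-kwak/algorithm | 프로그래머스/2/150369. 택배 배달과 수거하기/택배 배달과 수거하기.py | solution
-- ===== SOURCE A (Python) =====
-- def solution(cap, n, deliveries, pickups):
--     answer = 0
--
--     # 뒤에서부터 배달과 수거를 진행
--     d_remain, p_remain = 0, 0  # 배달 및 수거할 잔여 박스
--
--     for i in range(n - 1, -1, -1):  # 가장 먼 위치부터 체크
--         d_remain += deliveries[i]  # 해당 위치에서 배달할 박스 추가
--         p_remain += pickups[i]  # 해당 위치에서 수거할 박스 추가
--
--         # 배달과 수거를 한번에 처리하기 위해 필요한 이동 횟수 계산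
--         move_count = max((d_remain + cap - 1) // cap, (p_remain + cap - 1) // cap)
--
--         if move_count > 0:
--             answer += (i + 1) * 2 * move_count  # 왕복 거리 추가
--             d_remain -= move_count * cap  # 배달된 박스 차감
--             p_remain -= move_count * cap  # 수거된 박스 차감
--
--     return answer
-- ===== SOURCE B (Python) =====
-- def solution(cap, n, deliveries, pickups):
--     # Staged pipeline: per-position minimal trip counts, then a suffix running max,
--     # summed once and doubled at the end.
--     m = max(n, 0)
--
--     def need(xs):
--         # out[i] = ceil(sum(xs[i:]) / cap): trips forced by positions i and beyond
--         acc = 0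
--         out = []
--         for x in reversed(xs):
--             acc += x
--             out.append(-(-acc // cap))
--         out.reverse()
--         return out
--
--     req = [max(a, b) for a, b in zip(need(deliveries[:m]), need(pickups[:m]))]
--     best = 0
--     total = 0
--     for r in reversed(req):
--         best = max(best, r)
--         total += best
--     return 2 * total
-- ===== Notes on version B (the rewrite author's own statement) =====
-- stated objective: alternative
-- what changed: Replaces A's single backward loop (remainder subtraction plus weighted per-position round-trip accounting) by a staged pipeline: compute per-position minimal trip counts from suffix sums, take a suffix running maximum, and sum the running maxima once, doubling at the end.
-- outside the precondition, e.g. on solution(-1, 1, [1], [0]): A returns 4, B returns 0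
import Mathlib
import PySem

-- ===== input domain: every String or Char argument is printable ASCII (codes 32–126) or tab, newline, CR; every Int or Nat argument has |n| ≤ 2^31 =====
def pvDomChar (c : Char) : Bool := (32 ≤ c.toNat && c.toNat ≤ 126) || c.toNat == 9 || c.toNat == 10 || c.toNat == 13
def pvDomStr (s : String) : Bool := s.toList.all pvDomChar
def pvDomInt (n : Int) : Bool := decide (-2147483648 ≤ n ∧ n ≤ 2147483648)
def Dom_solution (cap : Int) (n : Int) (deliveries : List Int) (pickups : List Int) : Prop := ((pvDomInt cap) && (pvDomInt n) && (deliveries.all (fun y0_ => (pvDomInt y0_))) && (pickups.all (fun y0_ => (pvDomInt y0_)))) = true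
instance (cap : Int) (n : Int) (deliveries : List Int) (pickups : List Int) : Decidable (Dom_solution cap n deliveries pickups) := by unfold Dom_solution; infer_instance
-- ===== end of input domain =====

-- B replaces A's single backward loop with weighted per-position round-trip accounting by a
-- staged pipeline: per-position minimal trip counts, a suffix running max, one sum doubled
-- at the end (alternative decomposition, same O(n) cost).


-- ===== PORT A =====
-- loop body of A: state (answer, d_remain, p_remain)
def stepA (cap : Int) (deliveries : List Int) (pickups : List Int)
    (st : Int × Int × Int) (i : Int) : Int × Int × Int :=
  let d_remain := st.2.1 + PySem.List.pyGetD deliveries i 0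
  let p_remain := st.2.2 + PySem.List.pyGetD pickups i 0
  let move_count := max (PySem.Int.floordiv (d_remain + cap - 1) cap)
                        (PySem.Int.floordiv (p_remain + cap - 1) cap)
  if move_count > 0 then
    (st.1 + (i + 1) * 2 * move_count, d_remain - move_count * cap, p_remain - move_count * cap)
  else
    (st.1, d_remain, p_remain)

def solution (cap : Int) (n : Int) (deliveries : List Int) (pickups : List Int) : Int :=
  ((PySem.List.pyRange (n - 1) (-1) (-1)).foldl (stepA cap deliveries pickups) (0, 0, 0)).1

-- ===== PORT B =====
-- helper need(xs): running suffix sum over reversed(xs), appending ceil(acc / cap), then reverse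
def needStep (cap : Int) (st : Int × List Int) (x : Int) : Int × List Int :=
  (st.1 + x, st.2 ++ [-(PySem.Int.floordiv (-(st.1 + x)) cap)])

def needList (cap : Int) (xs : List Int) : List Int :=
  ((xs.reverse).foldl (needStep cap) (0, [])).2.reverse

def solution_alt (cap : Int) (n : Int) (deliveries : List Int) (pickups : List Int) : Int :=
  2 * (List.foldl (fun (st : Int × Int) r => (max st.1 r, st.2 + max st.1 r)) (0, 0)
        (List.reverse (List.map (fun ab => max ab.1 ab.2)
          ((needList cap (PySem.List.slice deliveries none (some (max n 0)))).zip
           (needList cap (PySem.List.slice pickups none (some (max n 0)))))))).2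

-- ===== PRECONDITION & SPEC =====
-- Pre_ restricts to the task's natural domain when the loop runs (n > 0): the truck capacity
-- must be positive (A raises ZeroDivisionError at cap = 0; a negative capacity is malformed
-- input outside the task's domain) and n ≤ length of both lists (A raises IndexError otherwise).
def Pre_solution (cap : Int) (n : Int) (deliveries : List Int) (pickups : List Int) : Prop :=
  (1 ≤ cap ∨ n ≤ 0) ∧ n ≤ (deliveries.length : Int) ∧ n ≤ (pickups.length : Int)
instance (cap : Int) (n : Int) (deliveries : List Int) (pickups : List Int) : Decidable (Pre_solution cap n deliveries pickups) := by unfold Pre_solution; infer_instance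
def pvWitness_solution : Int × Int × List Int × List Int := (4, 2, [1, 2], [0, 3])

def Spec_solution (cap : Int) (n : Int) (deliveries : List Int) (pickups : List Int) (out : Int) : Prop := out = solution_alt cap n deliveries pickups
instance (cap : Int) (n : Int) (deliveries : List Int) (pickups : List Int) (out : Int) : Decidable (Spec_solution cap n deliveries pickups out) := by unfold Spec_solution; infer_instance

-- ===== CLAIM (what is proved, stated in full; the proofs are below) =====
def Claim_equal_solution : Prop := ∀ (cap : Int) (n : Int) (deliveries : List Int) (pickups : List Int), Dom_solution cap n deliveries pickups → Pre_solution cap n deliveries pickups → Spec_solution cap n deliveries pickups (solution cap n deliveries pickups)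

-- ===== LEMMAS AND PROOFS =====

-- ceils cap acc xs : the list of ceil((acc + partial sum)/cap) over xs, front to back
def ceils (cap : Int) : Int → List Int → List Int
  | _, [] => []
  | acc, x :: xs => (-(PySem.Int.floordiv (-(acc + x)) cap)) :: ceils cap (acc + x) xs

-- sum of the running maxima of l, starting from t
def cumL : Int → List Int → Int
  | _, [] => 0
  | t, r :: rs => max t r + cumL (max t r) rs

-- combined reference: suffix sums d,p, cumulative trips t, summing the running trip counts
def cum2 (cap : Int) : Int → Int → Int → List (Int × Int) → Int
  | _, _, _, [] => 0
  | d, p, t, (x, y) :: rest =>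
      max t (max (-(PySem.Int.floordiv (-(d + x)) cap)) (-(PySem.Int.floordiv (-(p + y)) cap)))
      + cum2 cap (d + x) (p + y)
          (max t (max (-(PySem.Int.floordiv (-(d + x)) cap)) (-(PySem.Int.floordiv (-(p + y)) cap)))) rest

-- A's loop as a recursion over the (delivery, pickup) pairs in processing order (far to near)
def refA (cap : Int) : List (Int × Int) → Int → Int × Int × Int → Int × Int × Int
  | [], _, st => st
  | (x, y) :: rest, i, st =>
      refA cap rest (i - 1)
        (if max (PySem.Int.floordiv (st.2.1 + x + cap - 1) cap)
                (PySem.Int.floordiv (st.2.2 + y + cap - 1) cap) > 0 then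
           (st.1 + (i + 1) * 2 * max (PySem.Int.floordiv (st.2.1 + x + cap - 1) cap)
                                     (PySem.Int.floordiv (st.2.2 + y + cap - 1) cap),
            st.2.1 + x - max (PySem.Int.floordiv (st.2.1 + x + cap - 1) cap)
                             (PySem.Int.floordiv (st.2.2 + y + cap - 1) cap) * cap,
            st.2.2 + y - max (PySem.Int.floordiv (st.2.1 + x + cap - 1) cap)
                             (PySem.Int.floordiv (st.2.2 + y + cap - 1) cap) * cap)
         else (st.1, st.2.1 + x, st.2.2 + y))

-- (x + cap - 1) // cap is the ceiling -((-x) // cap), for cap > 0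
lemma ceil_eq (cap x : Int) (hc : 0 < cap) :
    PySem.Int.floordiv (x + cap - 1) cap = -(PySem.Int.floordiv (-x) cap) := by
  set q := PySem.Int.floordiv (x + cap - 1) cap with hq
  have h := (PySem.Int.floordiv_eq_iff_of_pos hc (a := x + cap - 1) (q := q)).mp hq.symm
  symm
  rw [PySem.Int.neg_floordiv_neg_eq_iff_of_pos hc]
  have e1 : (q - 1) * cap = q * cap - cap := by ring
  have e2 : (q + 1) * cap = q * cap + cap := by ring
  constructor <;> [linarith [h.1, e1]; linarith [h.2, e2]]

-- the floor division shifts by whole multiples of cap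
lemma fd_shift (cap x t : Int) (hc : 0 < cap) :
    PySem.Int.floordiv (-(x + t * cap)) cap = PySem.Int.floordiv (-x) cap - t := by
  rw [PySem.Int.floordiv_eq_ediv_of_pos hc, PySem.Int.floordiv_eq_ediv_of_pos hc]
  have e : -(x + t * cap) = -x + (-t) * cap := by ring
  rw [e, Int.add_mul_ediv_right _ _ (ne_of_gt hc)]
  ring

-- ceiling bracket: ceil(x/cap) ≤ t ↔ x ≤ t*cap
lemma ceil_le_iff (cap x t : Int) (hc : 0 < cap) :
    -(PySem.Int.floordiv (-x) cap) ≤ t ↔ x ≤ t * cap := by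
  have h := PySem.Int.le_floordiv_iff_mul_le (q := -t) (a := -x) hc
  constructor
  · intro hx
    have h2 := h.mp (by omega)
    nlinarith [h2]
  · intro hx
    have h2 : (-t) * cap ≤ -x := by nlinarith
    have := h.mpr h2
    omega

lemma need_foldl (cap : Int) :
    ∀ (xs : List Int) (acc : Int) (out : List Int),
      xs.foldl (needStep cap) (acc, out) = (acc + xs.sum, out ++ ceils cap acc xs) := by
  intro xs
  induction xs with
  | nil => intro acc out; simp [ceils]
  | cons x xs ih =>
      intro acc out
      simp only [List.foldl_cons, needStep, ceils, ih, List.sum_cons, List.append_assoc,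
        List.singleton_append]
      rw [add_assoc]

lemma needList_eq (cap : Int) (xs : List Int) :
    needList cap xs = (ceils cap 0 xs.reverse).reverse := by
  unfold needList
  rw [need_foldl]
  simp

lemma length_ceils (cap : Int) : ∀ (acc : Int) (xs : List Int),
    (ceils cap acc xs).length = xs.length := by
  intro acc xs
  induction xs generalizing acc with
  | nil => simp [ceils]
  | cons x xs ih => simp [ceils, ih]

lemma foldB (l : List Int) : ∀ (t s : Int),
    (l.foldl (fun (st : Int × Int) r => (max st.1 r, st.2 + max st.1 r)) (t, s)).2
      = s + cumL t l := by
  induction l with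
  | nil => intro t s; simp [cumL]
  | cons r rs ih => intro t s; simp only [List.foldl_cons, cumL, ih]; ring

lemma cumL_zip (cap : Int) : ∀ (rds rps : List Int), rds.length = rps.length →
    ∀ (d p t : Int),
      cumL t (((ceils cap d rds).zip (ceils cap p rps)).map (fun ab => max ab.1 ab.2))
        = cum2 cap d p t (rds.zip rps) := by
  intro rds
  induction rds with
  | nil => intro rps _ d p t; simp [ceils, cumL, cum2]
  | cons x xs ih =>
      intro rps hlen d p t
      cases rps with
      | nil => simp at hlen
      | cons y ys =>
          simp only [ceils, List.zip_cons_cons, List.map_cons, cumL, cum2]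
          rw [ih ys (by simp only [List.length_cons] at hlen; omega)]

lemma zip_reverse {α β : Type} : ∀ (a : List α) (b : List β), a.length = b.length →
    (a.zip b).reverse = a.reverse.zip b.reverse := by
  intro a
  induction a with
  | nil => intro b h; cases b <;> simp_all
  | cons x xs ih =>
      intro b h
      cases b with
      | nil => simp at h
      | cons y ys =>
          have h' : xs.length = ys.length := by simp only [List.length_cons] at h; omega
          simp only [List.zip_cons_cons, List.reverse_cons]
          rw [ih ys h', List.zip_append (by simp [h'])]
          simp

-- the core invariant: A's recursion computes twice the sum of running trip counts
lemma refA_eq (cap : Int) (hc : 0 < cap) :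
    ∀ (rdp : List (Int × Int)) (i d p t ans : Int), i = (rdp.length : Int) - 1 →
      0 ≤ t → d ≤ t * cap → p ≤ t * cap →
      (refA cap rdp i (ans, d - t * cap, p - t * cap)).1
        = ans + 2 * cum2 cap d p t rdp - 2 * (rdp.length : Int) * t := by
  intro rdp
  induction rdp with
  | nil => intro i d p t ans _ _ _ _; simp [refA, cum2]
  | cons xy rest ih =>
      obtain ⟨x, y⟩ := xy
      intro i d p t ans hi ht hd hp
      have hi' : i = (rest.length : Int) := by
        simp only [List.length_cons] at hi; push_cast at hi; omega
      subst hi'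
      have hcd' : PySem.Int.floordiv (d - t * cap + x + cap - 1) cap
          = -(PySem.Int.floordiv (-(d + x)) cap) - t := by
        rw [show d - t * cap + x + cap - 1 = ((d + x) + (-t) * cap) + cap - 1 by ring,
          ceil_eq cap ((d + x) + (-t) * cap) hc, fd_shift cap (d + x) (-t) hc]
        ring
      have hcp' : PySem.Int.floordiv (p - t * cap + y + cap - 1) cap
          = -(PySem.Int.floordiv (-(p + y)) cap) - t := by
        rw [show p - t * cap + y + cap - 1 = ((p + y) + (-t) * cap) + cap - 1 by ring,
          ceil_eq cap ((p + y) + (-t) * cap) hc, fd_shift cap (p + y) (-t) hc]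
        ring
      set cd := -(PySem.Int.floordiv (-(d + x)) cap) with hcdv
      set cp := -(PySem.Int.floordiv (-(p + y)) cap) with hcpv
      have hmc : max (PySem.Int.floordiv (d - t * cap + x + cap - 1) cap)
                     (PySem.Int.floordiv (p - t * cap + y + cap - 1) cap) = max cd cp - t := by
        rw [hcd', hcp']; omega
      simp only [refA, hmc]
      by_cases hcase : max cd cp - t > 0
      · rw [if_pos hcase]
        have hb : max t (max cd cp) = max cd cp := by omega
        have hdr : d - t * cap + x - (max cd cp - t) * cap = (d + x) - (max cd cp) * cap := by ring
        have hpr : p - t * cap + y - (max cd cp - t) * cap = (p + y) - (max cd cp) * cap := by ring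
        rw [hdr, hpr]
        have hdx : d + x ≤ (max cd cp) * cap := by
          have := (ceil_le_iff cap (d + x) (max cd cp) hc).mp (by rw [← hcdv]; omega)
          exact this
        have hpy : p + y ≤ (max cd cp) * cap := by
          have := (ceil_le_iff cap (p + y) (max cd cp) hc).mp (by rw [← hcpv]; omega)
          exact this
        have := ih ((rest.length : Int) - 1) (d + x) (p + y) (max cd cp)
          (ans + ((rest.length : Int) + 1) * 2 * (max cd cp - t)) rfl (by omega) hdx hpy
        rw [this]
        simp only [cum2, ← hcdv, ← hcpv, hb, List.length_cons]
        push_cast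
        ring
      · rw [if_neg hcase]
        have hb : max t (max cd cp) = t := by omega
        have hdr : d - t * cap + x = (d + x) - t * cap := by ring
        have hpr : p - t * cap + y = (p + y) - t * cap := by ring
        rw [hdr, hpr]
        have hdx : d + x ≤ t * cap := (ceil_le_iff cap (d + x) t hc).mp (by rw [← hcdv]; omega)
        have hpy : p + y ≤ t * cap := (ceil_le_iff cap (p + y) t hc).mp (by rw [← hcpv]; omega)
        have := ih ((rest.length : Int) - 1) (d + x) (p + y) t ans rfl ht hdx hpy
        rw [this]
        simp only [cum2, ← hcdv, ← hcpv, hb, List.length_cons]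
        push_cast
        ring

-- bridge: A's pyRange fold equals refA over the reversed zipped prefixes
lemma bridgeA (cap : Int) (dels picks : List Int) :
    ∀ (k : Nat), k ≤ dels.length → k ≤ picks.length → ∀ (st : Int × Int × Int),
      (PySem.List.pyRange ((k : Int) - 1) (-1) (-1)).foldl (stepA cap dels picks) st
        = refA cap (((dels.take k).zip (picks.take k)).reverse) ((k : Int) - 1) st := by
  intro k
  induction k with
  | zero =>
      intro _ _ st
      rw [PySem.List.pyRange_neg_one_eq_nil (by norm_num)]
      simp [refA]
  | succ m ih =>
      intro hd hp st
      have hdm : m < dels.length := by omega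
      have hpm : m < picks.length := by omega
      have e : ((m + 1 : Nat) : Int) - 1 = (m : Int) := by push_cast; ring
      rw [e, PySem.List.pyRange_neg_one_cons (by omega)]
      simp only [List.foldl_cons]
      rw [ih (by omega) (by omega)]
      have htd : dels.take (m + 1) = dels.take m ++ [dels[m]] := by
        rw [List.take_add_one]
        simp [List.getElem?_eq_getElem hdm]
      have htp : picks.take (m + 1) = picks.take m ++ [picks[m]] := by
        rw [List.take_add_one]
        simp [List.getElem?_eq_getElem hpm]
      have hz : ((dels.take (m + 1)).zip (picks.take (m + 1))).reverse
          = (dels[m], picks[m]) :: ((dels.take m).zip (picks.take m)).reverse := by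
        rw [htd, htp, List.zip_append (by simp [Nat.le_of_lt hdm, Nat.le_of_lt hpm])]
        simp
      rw [hz]
      simp only [refA]
      congr 1
      have hgd : PySem.List.pyGetD dels ((m : Nat) : Int) 0 = dels[m] := by
        simp [PySem.List.pyGetD_natCast, List.getD_eq_getElem?_getD, List.getElem?_eq_getElem hdm]
      have hgp : PySem.List.pyGetD picks ((m : Nat) : Int) 0 = picks[m] := by
        simp [PySem.List.pyGetD_natCast, List.getD_eq_getElem?_getD, List.getElem?_eq_getElem hpm]
      simp only [stepA, hgd, hgp]

-- B's value, rewritten through the staged lemmas to the combined reference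
lemma alt_eq_cum2 (cap n : Int) (dels picks : List Int) (hn : 0 < n)
    (hld : n ≤ (dels.length : Int)) (hlp : n ≤ (picks.length : Int)) :
    solution_alt cap n dels picks
      = 2 * cum2 cap 0 0 0 (((dels.take n.toNat).zip (picks.take n.toNat)).reverse) := by
  have hmax : max n 0 = n := by omega
  have hsd : PySem.List.slice dels none (some n) = dels.take n.toNat :=
    PySem.List.slice_to dels (by omega)
  have hsp : PySem.List.slice picks none (some n) = picks.take n.toNat :=
    PySem.List.slice_to picks (by omega)
  have hlen : (dels.take n.toNat).length = (picks.take n.toNat).length := by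
    simp [List.length_take]; omega
  unfold solution_alt
  rw [hmax, hsd, hsp, needList_eq, needList_eq]
  have hlenc : (ceils cap 0 (dels.take n.toNat).reverse).reverse.length
      = (ceils cap 0 (picks.take n.toNat).reverse).reverse.length := by
    simp [length_ceils, hlen]
  rw [← List.map_reverse, zip_reverse _ _ hlenc]
  simp only [List.reverse_reverse]
  rw [foldB, cumL_zip cap _ _ (by simp [hlen]), ← zip_reverse _ _ hlen]
  ring

-- ===== VERDICT (by name: the statement is the Claim_ definition above) =====
theorem solution_spec : Claim_equal_solution := by
  intro cap n dels picks hdom hpre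
  obtain ⟨hc, hld, hlp⟩ := hpre
  unfold Spec_solution
  by_cases hn : 0 < n
  · have hc1 : 0 < cap := by omega
    have hmn : ((n.toNat : Nat) : Int) = n := Int.toNat_of_nonneg (by omega)
    unfold solution
    rw [show n - 1 = ((n.toNat : Nat) : Int) - 1 by omega,
      bridgeA cap dels picks n.toNat (by omega) (by omega)]
    set rdp := ((dels.take n.toNat).zip (picks.take n.toNat)).reverse with hrdp
    have hlenr : (rdp.length : Int) = ((n.toNat : Nat) : Int) := by
      simp [hrdp, List.length_take]
      omega
    have := refA_eq cap hc1 rdp (((n.toNat : Nat) : Int) - 1) 0 0 0 0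
      (by omega) (le_refl 0) (by simp) (by simp)
    simp only [zero_mul, sub_zero, mul_zero, zero_add] at this
    rw [this]
    rw [alt_eq_cum2 cap n dels picks hn hld hlp, ← hrdp]
  · have hm0 : max n 0 = 0 := by omega
    unfold solution solution_alt
    rw [PySem.List.pyRange_neg_one_eq_nil (by omega), hm0,
      PySem.List.slice_to dels (by norm_num), PySem.List.slice_to picks (by norm_num)]
    simp [needList]
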